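-- pv_equiv track=rewrite | github.com/troshov/w | buns/mod7/task3.py | awe
-- ===== SOURCE A (Python) =====
-- def awe(n):
--     a = 1
--     for i in range(n):
--         for k in range(n):
--             for j in range(n):
--                 for q in range(n):
--                     a += 1
--     return a
-- ===== SOURCE B (Python) =====
-- def awe(n):
--     return 1 + max(n, 0) ** 4
-- ===== Notes on version B (the rewrite author's own statement) =====
-- stated objective: faster
-- what changed: Replaced the four nested counting loops with the closed form 1 + max(n,0)**4.
import Mathlib
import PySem

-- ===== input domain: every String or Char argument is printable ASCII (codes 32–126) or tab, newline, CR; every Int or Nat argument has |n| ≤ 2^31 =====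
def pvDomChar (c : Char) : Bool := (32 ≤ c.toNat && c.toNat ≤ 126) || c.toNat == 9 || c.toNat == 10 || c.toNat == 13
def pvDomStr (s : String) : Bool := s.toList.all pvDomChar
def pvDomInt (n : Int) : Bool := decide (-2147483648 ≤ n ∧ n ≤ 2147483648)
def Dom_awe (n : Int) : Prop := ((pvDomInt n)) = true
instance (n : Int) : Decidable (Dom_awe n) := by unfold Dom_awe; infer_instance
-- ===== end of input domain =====

-- B replaces A's four nested counting loops by the closed form 1 + max(n,0)^4 (faster).

-- ===== PORT A =====
def awe (n : Int) : Int :=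
  (PySem.List.pyRange 0 n 1).foldl (fun a _ =>
    (PySem.List.pyRange 0 n 1).foldl (fun a _ =>
      (PySem.List.pyRange 0 n 1).foldl (fun a _ =>
        (PySem.List.pyRange 0 n 1).foldl (fun a _ => a + 1) a) a) a) 1

-- ===== PORT B =====
def awe_alt (n : Int) : Int := 1 + (max n 0) ^ 4

-- ===== PRECONDITION & SPEC =====
def Spec_awe (n : Int) (out : Int) : Prop := out = awe_alt n
instance (n : Int) (out : Int) : Decidable (Spec_awe n out) := by unfold Spec_awe; infer_instance

-- ===== CLAIM (what is proved, stated in full; the proofs are below) =====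
def Claim_equal_awe : Prop := ∀ (n : Int), Dom_awe n → Spec_awe n (awe n)

-- ===== LEMMAS AND PROOFS =====

theorem foldl_shift (F : Int → Int) (c : Int) (h : ∀ a, F a = a + c) :
    ∀ (l : List Int) (a : Int), l.foldl (fun a _ => F a) a = a + c * l.length := by
  intro l
  induction l with
  | nil => intro a; simp
  | cons x xs ih => intro a; simp [List.foldl, ih, h a]; ring

-- ===== VERDICT (by name: the statement is the Claim_ definition above) =====
theorem awe_spec : Claim_equal_awe := by
  intro n _
  unfold Spec_awe awe awe_alt
  set l := PySem.List.pyRange 0 n 1 with hl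
  have hlen : (l.length : Int) = max n 0 := by
    rw [hl, PySem.List.length_pyRange_one]; omega
  have h1 : ∀ a : Int, l.foldl (fun a _ => a + 1) a = a + (l.length : Int) := by
    intro a; have := foldl_shift (fun a => a + 1) 1 (fun a => rfl) l a; simpa using this
  have h2 : ∀ a : Int,
      l.foldl (fun a _ => l.foldl (fun a _ => a + 1) a) a = a + (l.length : Int) ^ 2 := by
    intro a
    have := foldl_shift (fun a => l.foldl (fun a _ => a + 1) a) (l.length : Int) h1 l a
    simpa [sq] using this
  have h3 : ∀ a : Int,
      l.foldl (fun a _ => l.foldl (fun a _ => l.foldl (fun a _ => a + 1) a) a) a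
        = a + (l.length : Int) ^ 3 := by
    intro a
    have := foldl_shift _ ((l.length : Int) ^ 2) h2 l a
    rw [this]; ring
  have h4 := foldl_shift _ ((l.length : Int) ^ 3) h3 l 1
  rw [h4, hlen]; ring
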